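-- pv_equiv track=rewrite | github.com/Jyun-Neng/codejam-kickstart | 2018/practice/GoogolString/googol-string.py | solve
-- ===== SOURCE A (Python) =====
-- def solve(k):
--     k_mod_8 = k % 8
--     if (k_mod_8 == 0) or (k_mod_8 == 1) or (k_mod_8 == 4):
--         return 0
--     if (k_mod_8 == 2) or (k_mod_8 == 5) or (k_mod_8 == 6):
--         return 1
--     if k_mod_8 == 3:
--         if (k // 8) % 2 == 0:
--             return 0
--         return 1
--     if k_mod_8 == 7:
--         k //= 8
--         return solve(k)
-- ===== SOURCE B (Python) =====
-- def solve(k):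
--     p = k + 1
--     while p % 2 == 0:
--         p //= 2
--     return 0 if p % 4 == 1 else 1
-- ===== Notes on version B (the rewrite author's own statement) =====
-- stated objective: simpler
-- what changed: Replaces the base-8 mod casework with divide-by-8 recursion by stripping all factors of two from k+1 and testing the remaining odd number mod 4 (the standard self-similar closed form of the Googol string).
import Mathlib
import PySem

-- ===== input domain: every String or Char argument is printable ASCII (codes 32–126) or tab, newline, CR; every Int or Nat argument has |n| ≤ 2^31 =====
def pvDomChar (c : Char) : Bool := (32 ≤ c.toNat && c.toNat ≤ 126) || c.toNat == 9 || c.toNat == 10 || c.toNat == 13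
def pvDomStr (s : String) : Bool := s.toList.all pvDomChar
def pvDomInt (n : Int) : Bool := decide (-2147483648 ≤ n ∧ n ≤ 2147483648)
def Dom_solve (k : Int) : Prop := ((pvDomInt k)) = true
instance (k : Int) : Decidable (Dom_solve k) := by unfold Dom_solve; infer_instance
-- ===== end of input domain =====

-- B computes the same digit by stripping the factors of two from k+1 and testing the odd part mod 4 (objective: simpler).

-- ===== PORT A =====
def solve (k : Int) : Int :=
  let k_mod_8 := PySem.Int.mod k 8
  if k_mod_8 = 0 ∨ k_mod_8 = 1 ∨ k_mod_8 = 4 then 0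
  else if k_mod_8 = 2 ∨ k_mod_8 = 5 ∨ k_mod_8 = 6 then 1
  else if k_mod_8 = 3 then
    (if PySem.Int.mod (PySem.Int.floordiv k 8) 2 = 0 then 0 else 1)
  else if h7 : k_mod_8 = 7 then
    -- guard for totality only: at k = -1 the Python recursion never terminates (outside Pre_)
    (if hk : k = -1 then 0 else solve (PySem.Int.floordiv k 8))
  else 0  -- unreachable: k % 8 is always in 0..7
termination_by (k + 1).natAbs
decreasing_by
  have h7' : PySem.Int.mod k 8 = 7 := h7
  have h8 : PySem.Int.mod k 8 = k % 8 := PySem.Int.mod_eq_emod_of_pos (by omega)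
  have hd : PySem.Int.floordiv k 8 = k / 8 := PySem.Int.floordiv_eq_ediv_of_pos (by omega)
  rw [hd]; rw [h8] at h7'; omega

-- ===== PORT B =====
-- the 'while p % 2 == 0' loop of Source B; guard p ≠ 0 for totality only (Python loops forever at p = 0, outside Pre_)
def stripTwos (p : Int) : Int :=
  if h : p ≠ 0 ∧ PySem.Int.mod p 2 = 0 then stripTwos (PySem.Int.floordiv p 2) else p
termination_by p.natAbs
decreasing_by
  obtain ⟨h0, he⟩ := h
  have h2 : PySem.Int.mod p 2 = p % 2 := PySem.Int.mod_eq_emod_of_pos (by omega)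
  have hd : PySem.Int.floordiv p 2 = p / 2 := PySem.Int.floordiv_eq_ediv_of_pos (by omega)
  rw [hd]; rw [h2] at he; omega

def solve_alt (k : Int) : Int :=
  let p := stripTwos (k + 1)
  if PySem.Int.mod p 4 = 1 then 0 else 1

-- ===== PRECONDITION & SPEC =====
-- Pre_ excludes exactly k = -1, where the Python A raises RecursionError (and B loops forever).
def Pre_solve (k : Int) : Prop := k ≠ -1
instance (k : Int) : Decidable (Pre_solve k) := by unfold Pre_solve; infer_instance
def pvWitness_solve : Int := 0

def Spec_solve (k : Int) (out : Int) : Prop := out = solve_alt k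
instance (k : Int) (out : Int) : Decidable (Spec_solve k out) := by unfold Spec_solve; infer_instance

-- ===== CLAIM (what is proved, stated in full; the proofs are below) =====
def Claim_equal_solve : Prop := ∀ (k : Int), Dom_solve k → Pre_solve k → Spec_solve k (solve k)

-- ===== LEMMAS AND PROOFS =====

lemma stripTwos_odd (p : Int) (h : p % 2 = 1) : stripTwos p = p := by
  rw [stripTwos.eq_def]
  simp [h]

lemma stripTwos_even (p : Int) (h0 : p ≠ 0) (h : p % 2 = 0) :
    stripTwos p = stripTwos (p / 2) := by
  rw [stripTwos.eq_def]
  simp [h, h0]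

lemma solve_eq_alt (k : Int) (hk : k ≠ -1) : solve k = solve_alt k := by
  induction hn : (k + 1).natAbs using Nat.strong_induction_on generalizing k with
  | _ n ih =>
  subst hn
  have h8 : PySem.Int.mod k 8 = k % 8 := PySem.Int.mod_eq_emod_of_pos (by omega)
  have hd : PySem.Int.floordiv k 8 = k / 8 := PySem.Int.floordiv_eq_ediv_of_pos (by omega)
  have hm4 : ∀ p : Int, PySem.Int.mod p 4 = p % 4 :=
    fun p => PySem.Int.mod_eq_emod_of_pos (by omega)
  have hr : k % 8 = 0 ∨ k % 8 = 1 ∨ k % 8 = 2 ∨ k % 8 = 3 ∨ k % 8 = 4 ∨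
      k % 8 = 5 ∨ k % 8 = 6 ∨ k % 8 = 7 := by omega
  rw [solve.eq_def, solve_alt]
  simp only [h8, hd, hm4]
  rcases hr with h | h | h | h | h | h | h | h
  · -- k % 8 = 0 : k+1 odd, (k+1) % 4 = 1
    rw [stripTwos_odd (k + 1) (by omega)]
    simp [h]; omega
  · -- k % 8 = 1 : strip one two, (k+1)/2 ≡ 1 mod 4
    rw [stripTwos_even (k + 1) (by omega) (by omega),
        stripTwos_odd ((k + 1) / 2) (by omega)]
    simp [h]; omega
  · -- k % 8 = 2 : k+1 odd, (k+1) % 4 = 3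
    rw [stripTwos_odd (k + 1) (by omega)]
    simp [h]; omega
  · -- k % 8 = 3 : strip two twos; odd part ≡ 1 mod 4 iff k/8 even
    rw [stripTwos_even (k + 1) (by omega) (by omega),
        stripTwos_even ((k + 1) / 2) (by omega) (by omega),
        stripTwos_odd ((k + 1) / 2 / 2) (by omega)]
    simp only [h]
    norm_num
    split <;> split <;> first | rfl | omega
  · -- k % 8 = 4
    rw [stripTwos_odd (k + 1) (by omega)]
    simp [h]; omega
  · -- k % 8 = 5
    rw [stripTwos_even (k + 1) (by omega) (by omega),
        stripTwos_odd ((k + 1) / 2) (by omega)]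
    simp [h]; omega
  · -- k % 8 = 6
    rw [stripTwos_odd (k + 1) (by omega)]
    simp [h]; omega
  · -- k % 8 = 7 : recurse; stripTwos (k+1) = stripTwos (k/8 + 1)
    have hq : k / 8 ≠ -1 := by omega
    have hstrip : stripTwos (k + 1) = stripTwos (k / 8 + 1) := by
      rw [stripTwos_even (k + 1) (by omega) (by omega),
          stripTwos_even ((k + 1) / 2) (by omega) (by omega),
          stripTwos_even ((k + 1) / 2 / 2) (by omega) (by omega)]
      congr 1; omega
    have hrec := ih (k / 8 + 1).natAbs (by omega) (k / 8) hq rfl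
    rw [solve_alt] at hrec
    simp only [hm4] at hrec
    simp [h, hk, hrec, hstrip]

-- ===== VERDICT (by name: the statement is the Claim_ definition above) =====
theorem solve_spec : Claim_equal_solve := by
  intro k _ hpre
  unfold Spec_solve
  exact solve_eq_alt k hpre
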